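-- pv_equiv track=rewrite | github.com/a100kpm/daily_training | problem 0249.py | max_xor_duoelem
-- ===== SOURCE A (Python) =====
-- def max_xor_duoelem(List):
--     curr_max=max(List)
--     curr_max2=min(List)
--
--     lenn=len(List)
--     for i in range(lenn):
--         if List[i]!=curr_max and List[i]>curr_max2:
--             curr_max2=List[i]
--
--
--     return curr_max+curr_max2
-- ===== SOURCE B (Python) =====
-- def max_xor_duoelem(List):
--     m = max(List)
--     distinct = sorted(set(List))
--     second = distinct[-2] if len(distinct) > 1 else m
--     return m + second
-- ===== Notes on version B (the rewrite author's own statement) =====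
-- stated objective: simpler
-- what changed: Replaces A's min-seeded running scan for the largest non-max value by deduplicating and sorting the distinct values and taking the second-to-last one.
import Mathlib
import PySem

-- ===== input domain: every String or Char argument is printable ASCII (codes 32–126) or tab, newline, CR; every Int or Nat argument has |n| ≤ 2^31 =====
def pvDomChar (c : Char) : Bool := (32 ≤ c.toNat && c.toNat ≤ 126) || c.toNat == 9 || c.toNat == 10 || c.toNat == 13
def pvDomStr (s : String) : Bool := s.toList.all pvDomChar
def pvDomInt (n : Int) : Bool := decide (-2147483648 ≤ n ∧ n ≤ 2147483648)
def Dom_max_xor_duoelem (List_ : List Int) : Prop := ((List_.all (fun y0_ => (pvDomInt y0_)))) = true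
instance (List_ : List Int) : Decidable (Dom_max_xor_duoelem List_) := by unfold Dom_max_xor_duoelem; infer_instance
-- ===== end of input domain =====

-- B computes the same sum (max plus largest value below the max, or 2*max when all values
-- are equal) by sorting the distinct values and taking the second-to-last, instead of A's
-- min-seeded running scan; objective: simpler.

-- ===== PORT A =====
def max_xor_duoelem (List_ : List Int) : Int :=
  match PySem.List.max? List_ (fun x => x), PySem.List.min? List_ (fun x => x) with
  | some curr_max, some curr_min =>
    let lenn : Int := List_.length
    let curr_max2 := (PySem.List.pyRange 0 lenn 1).foldl
      (fun c2 i =>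
        if PySem.List.pyGetD List_ i 0 ≠ curr_max ∧ PySem.List.pyGetD List_ i 0 > c2
        then PySem.List.pyGetD List_ i 0 else c2) curr_min
    curr_max + curr_max2
  | _, _ => 0    -- max/min of an empty list raises: excluded by Pre_

-- ===== PORT B =====
def max_xor_duoelem_alt (List_ : List Int) : Int :=
  match PySem.List.max? List_ (fun x => x) with
  | some m =>
    let distinct := PySem.List.sorted (PySem.Set.ofList List_) (fun x => x) false
    let second := if distinct.length > 1 then PySem.List.pyGetD distinct (-2) 0 else m
    m + second
  | none => 0    -- max of an empty list raises: excluded by Pre_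

-- ===== PRECONDITION & SPEC =====
-- A raises ValueError on the empty list (max([])); excluded.
def Pre_max_xor_duoelem (List_ : List Int) : Prop := List_ ≠ []
instance (List_ : List Int) : Decidable (Pre_max_xor_duoelem List_) := by unfold Pre_max_xor_duoelem; infer_instance
def pvWitness_max_xor_duoelem : List Int := [3, 1, 3, 2]

def Spec_max_xor_duoelem (List_ : List Int) (out : Int) : Prop := out = max_xor_duoelem_alt List_
instance (List_ : List Int) (out : Int) : Decidable (Spec_max_xor_duoelem List_ out) := by unfold Spec_max_xor_duoelem; infer_instance

-- ===== CLAIM (what is proved, stated in full; the proofs are below) =====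
def Claim_equal_max_xor_duoelem : Prop := ∀ (List_ : List Int), Dom_max_xor_duoelem List_ → Pre_max_xor_duoelem List_ → Spec_max_xor_duoelem List_ (max_xor_duoelem List_)

-- ===== LEMMAS AND PROOFS =====
theorem last_ub (l : List Int) (h : l.Pairwise (· < ·)) (hne : l ≠ []) :
    ∀ y ∈ l, y ≤ l.getLast hne := by
  induction l with
  | nil => simp at hne
  | cons a t ih =>
    intro y hy
    cases t with
    | nil => simp at hy; simp [hy]
    | cons b r =>
      rw [List.getLast_cons (by simp)]
      rcases List.mem_cons.mp hy with rfl | hyt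
      · exact le_trans (le_of_lt ((List.pairwise_cons.mp h).1 b (by simp)))
          (ih (List.pairwise_cons.mp h).2 (by simp) b (by simp))
      · exact ih (List.pairwise_cons.mp h).2 (by simp) y hyt

theorem foldA_filter (M : Int) : ∀ (l : List Int) (c : Int),
    l.foldl (fun c2 v => if v ≠ M ∧ v > c2 then v else c2) c
      = (l.filter (fun v => decide (v ≠ M))).foldl max c := by
  intro l
  induction l with
  | nil => intro c; rfl
  | cons a t ih =>
    intro c
    by_cases ha : a = M
    · simp only [List.foldl_cons, List.filter_cons, ha]
      rw [if_neg (by simp), if_neg (by simp)]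
      exact ih c
    · have hfil : (a :: t).filter (fun v => decide (v ≠ M)) = a :: t.filter (fun v => decide (v ≠ M)) := by
        simp [ha]
      rw [hfil]
      simp only [List.foldl_cons]
      rw [ih]
      congr 1
      by_cases hgt : a > c
      · rw [if_pos ⟨ha, hgt⟩]; omega
      · rw [if_neg (by tauto)]; omega

theorem main (List_ : List Int) (h : List_ ≠ []) :
    max_xor_duoelem List_ = max_xor_duoelem_alt List_ := by
  obtain ⟨x, t, rfl⟩ := List.exists_cons_of_ne_nil h
  have hMmem : (t.foldl max x) ∈ x :: t := by
    rcases PySem.List.foldl_max_mem t x with h' | h'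
    · rw [h']; exact List.mem_cons_self
    · exact List.mem_cons_of_mem _ h'
  have hMub : ∀ y ∈ x :: t, y ≤ t.foldl max x := by
    intro y hy
    rcases List.mem_cons.mp hy with rfl | hyt
    · exact (PySem.List.le_foldl_max t y).1
    · exact (PySem.List.le_foldl_max t x).2 y hyt
  have hmnmem : (t.foldl min x) ∈ x :: t := by
    rcases PySem.List.foldl_min_mem t x with h' | h'
    · rw [h']; exact List.mem_cons_self
    · exact List.mem_cons_of_mem _ h'
  have hmnlb : ∀ y ∈ x :: t, t.foldl min x ≤ y := by
    intro y hy
    rcases List.mem_cons.mp hy with rfl | hyt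
    · exact (PySem.List.foldl_min_le t y).1
    · exact (PySem.List.foldl_min_le t x).2 y hyt
  rw [max_xor_duoelem, max_xor_duoelem_alt, PySem.List.max?_id_cons, PySem.List.min?_id_cons]
  simp only
  rw [PySem.List.foldl_pyRange_zero_pyGetD' (x :: t) 0
    (fun c2 v => if v ≠ t.foldl max x ∧ v > c2 then v else c2) (t.foldl min x)]
  rw [foldA_filter]
  generalize hM : t.foldl max x = M at *
  generalize hmn : t.foldl min x = mn at *
  -- B-side facts about distinct
  have hperm := PySem.List.sorted_perm (PySem.Set.ofList (x :: t)) (fun y => y) false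
  have hpw := PySem.List.sorted_ofList_pairwise_lt (xs := x :: t)
  set d := PySem.List.sorted (PySem.Set.ofList (x :: t)) (fun y => y) false with hd
  have hmem : ∀ z, z ∈ d ↔ z ∈ x :: t := by
    intro z; rw [hperm.mem_iff, PySem.Set.mem_ofList]
  have hnd : d.Nodup := hperm.symm.nodup (PySem.Set.nodup_ofList _)
  -- the filtered list on A's side
  set fl := (x :: t).filter (fun v => decide (v ≠ M)) with hfl
  have hflmem : ∀ z, z ∈ fl ↔ z ∈ x :: t ∧ z ≠ M := by
    intro z; simp [hfl, List.mem_filter]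
  have hFub : ∀ y ∈ fl, y ≤ fl.foldl max mn := (PySem.List.le_foldl_max fl mn).2
  have hFlow : mn ≤ fl.foldl max mn := (PySem.List.le_foldl_max fl mn).1
  by_cases hall : ∀ y ∈ x :: t, y = M
  · -- all elements equal the max
    have hdall : ∀ z ∈ d, z = M := fun z hz => hall z ((hmem z).mp hz)
    have hdone : d = [M] := by
      match hdM : d with
      | [] => exact absurd ((hmem M).mpr hMmem) (by simp)
      | [a] => rw [hdall a (by simp)]
      | a :: b :: r =>
        have ha : a = M := hdall a (by simp)
        have hb : b = M := hdall b (by simp)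
        have := (List.pairwise_cons.mp hpw).1 b (by simp)
        omega
    have hflnil : fl = [] := by
      rw [hfl, List.filter_eq_nil_iff]
      intro a ha; simpa using hall a ha
    rw [hflnil, hdone]
    simp only [List.foldl_nil, List.length_singleton]
    rw [if_neg (by omega)]
    have := hall mn hmnmem
    omega
  · push Not at hall
    obtain ⟨v, hvmem, hvne⟩ := hall
    -- d = ys ++ [z] with z = M
    rcases List.eq_nil_or_concat d with hnil | ⟨ys, z, hcat⟩
    · exact absurd ((hmem M).mpr hMmem) (by simp [hnil])
    rw [List.concat_eq_append] at hcat
    have hpw2 := hcat ▸ hpw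
    have hys_lt : ∀ y ∈ ys, y < z := by
      intro y hy
      have := (List.pairwise_append.mp hpw2).2.2
      exact this y hy z (by simp)
    have hzM : z = M := by
      have hz_le : z ≤ M := hMub z ((hmem z).mp (by simp [hcat]))
      have hM_le : M ≤ z := by
        have hMd : M ∈ d := (hmem M).mpr hMmem
        rw [hcat] at hMd
        rcases List.mem_append.mp hMd with hMy | hMz
        · exact le_of_lt (hys_lt M hMy)
        · simp at hMz; omega
      omega
    have hysne : ys ≠ [] := by
      have hvd : v ∈ d := (hmem v).mpr hvmem
      rw [hcat] at hvd
      rcases List.mem_append.mp hvd with hvy | hvz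
      · exact List.ne_nil_of_mem hvy
      · simp at hvz; omega
    -- B's second = last of ys
    have hlen : d.length = ys.length + 1 := by rw [hcat]; simp
    have hys_pos : 0 < ys.length := List.length_pos_iff.mpr hysne
    rw [if_pos (by omega)]
    have hget : PySem.List.pyGetD d (-2) 0 = d[d.length - 2] := by
      rw [PySem.List.pyGetD_neg_ofNat d 2 0 (by omega) (by omega)]
    have hidx : d[d.length - 2]'(by omega) = ys.getLast hysne := by
      rw [List.getLast_eq_getElem]
      simp only [hcat, List.length_append, List.length_singleton]
      have h2 : ys.length + 1 - 2 = ys.length - 1 := by omega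
      simp only [h2]
      exact List.getElem_append_left (by omega)
    set g := ys.getLast hysne with hg
    have hgys : g ∈ ys := List.getLast_mem hysne
    have hys_ub : ∀ y ∈ ys, y ≤ g :=
      last_ub ys (List.pairwise_append.mp hpw2).1 hysne
    have hysmem : ∀ y, y ∈ ys ↔ y ∈ x :: t ∧ y ≠ M := by
      intro y
      constructor
      · intro hy
        refine ⟨(hmem y).mp (by simp [hcat, hy]), ?_⟩
        have := hys_lt y hy; omega
      · rintro ⟨hyL, hyne⟩
        have : y ∈ d := (hmem y).mpr hyL
        rw [hcat] at this
        rcases List.mem_append.mp this with h' | h'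
        · exact h'
        · simp at h'; omega
    -- F = g
    have hmnne : mn ≠ M := by
      have h1 : mn ≤ v := hmnlb v hvmem
      have h2 : v ≤ M := hMub v hvmem
      omega
    have hFin : fl.foldl max mn ∈ x :: t ∧ fl.foldl max mn ≠ M := by
      rcases PySem.List.foldl_max_mem fl mn with h' | h'
      · rw [h']; exact ⟨hmnmem, hmnne⟩
      · exact (hflmem _).mp h'
    have hF_le_g : fl.foldl max mn ≤ g := hys_ub _ ((hysmem _).mpr hFin)
    have hg_le_F : g ≤ fl.foldl max mn := by
      apply hFub
      exact (hflmem g).mpr ((hysmem g).mp hgys)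
    rw [hget, hidx]
    omega

-- ===== VERDICT (by name: the statement is the Claim_ definition above) =====
theorem max_xor_duoelem_spec : Claim_equal_max_xor_duoelem := by
  intro List_ _ hpre
  unfold Spec_max_xor_duoelem
  exact main List_ hpre
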